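-- pv_equiv track=rewrite | github.com/Amirshox/ProblemSolving | binarysearch.com/Beer-Bottles.py | solve
-- ===== SOURCE A (Python) =====
-- def solve(n):
--     empty = 0
--     drunken = 0
--
--     while n:
--         drunken += n
--         empty += n
--         n = empty // 3
--         empty %= 3
--
--     return drunken
-- ===== SOURCE B (Python) =====
-- def solve(n):
--     # closed form: each exchange of 3 empties yields 1 more bottle, so total = n + (n-1)//2
--     if n <= 0:
--         return 0
--     return n + (n - 1) // 2
-- ===== Notes on version B (the rewrite author's own statement) =====
-- stated objective: faster
-- what changed: Replaces the exchange-simulation while loop with the closed form n + (n-1)//2 (guarded at n <= 0), removing the loop and both accumulators.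
-- outside the precondition, e.g. on solve(-5): A returns -8, B returns 0
import Mathlib
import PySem

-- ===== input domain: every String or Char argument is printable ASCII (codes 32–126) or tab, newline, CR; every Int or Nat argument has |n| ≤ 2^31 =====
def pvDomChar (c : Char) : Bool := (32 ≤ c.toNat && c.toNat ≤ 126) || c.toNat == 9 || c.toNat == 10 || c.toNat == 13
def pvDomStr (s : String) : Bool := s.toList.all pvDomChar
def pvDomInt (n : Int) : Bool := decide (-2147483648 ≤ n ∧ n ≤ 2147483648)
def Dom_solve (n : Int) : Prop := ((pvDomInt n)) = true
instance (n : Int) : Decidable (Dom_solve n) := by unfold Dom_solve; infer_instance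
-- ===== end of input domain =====

-- B replaces A's exchange-simulation loop with the closed form n + (n-1)//2 (objective: faster, O(1) vs O(log n)).

-- ===== PORT A =====
-- the while loop of A; fuel only makes the recursion total (2*|n|+4 steps always suffice
-- on the claimed domain 0 ≤ n, where the loop runs at most 2*n+1 iterations)
def loopA (fuel : Nat) (drunken empty n : Int) : Int :=
  match fuel with
  | 0 => drunken
  | Nat.succ f =>
    if n = 0 then drunken
    else
      let drunken' := drunken + n
      let empty' := empty + n
      let n' := PySem.Int.floordiv empty' 3
      let empty'' := PySem.Int.mod empty' 3
      loopA f drunken' empty'' n'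

def solve (n : Int) : Int := loopA (2 * n.natAbs + 4) 0 0 n

-- ===== PORT B =====
def solve_alt (n : Int) : Int :=
  if n ≤ 0 then 0 else n + PySem.Int.floordiv (n - 1) 2

-- ===== PRECONDITION & SPEC =====
-- Pre_ restricts to the natural domain of non-negative bottle counts; negative counts are
-- outside the task's meaning, so nothing is claimed there (see claim.json cites).
def Pre_solve (n : Int) : Prop := 0 ≤ n
instance (n : Int) : Decidable (Pre_solve n) := by unfold Pre_solve; infer_instance
def pvWitness_solve : Int := (7)

def Spec_solve (n : Int) (out : Int) : Prop := out = solve_alt n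
instance (n : Int) (out : Int) : Decidable (Spec_solve n out) := by unfold Spec_solve; infer_instance

-- ===== CLAIM (what is proved, stated in full; the proofs are below) =====
def Claim_equal_solve : Prop := ∀ (n : Int), Dom_solve n → Pre_solve n → Spec_solve n (solve n)

-- ===== LEMMAS AND PROOFS =====

-- Loop characterisation: from state (drunken, empty, n) with 0 ≤ empty < 3 and 0 ≤ n,
-- given enough fuel, the loop returns drunken + (0 if empty+n = 0 else n + (empty+n-1)//2).
lemma loopA_eq (fuel : Nat) : ∀ (d e n : Int), 0 ≤ e → e < 3 → 0 ≤ n →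
    2 * n + e ≤ (fuel : Int) →
    loopA fuel d e n = d + (if e + n = 0 then 0 else n + (e + n - 1) / 2) := by
  induction fuel with
  | zero =>
    intro d e n he he3 hn hf
    simp only [Nat.cast_zero] at hf
    have hn0 : n = 0 := by omega
    have he0 : e = 0 := by omega
    simp [loopA, hn0, he0]
  | succ f ih =>
    intro d e n he he3 hn hf
    by_cases h0 : n = 0
    · subst h0
      rw [show loopA (f + 1) d e 0 = d by simp [loopA]]
      split_ifs with h <;> omega
    · have hn1 : 1 ≤ n := by omega
      simp only [loopA, if_neg h0]
      have h3 : (0:Int) < 3 := by norm_num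
      rw [PySem.Int.floordiv_eq_ediv_of_pos (a := e + n) h3,
          PySem.Int.mod_eq_emod_of_pos (a := e + n) h3]
      rw [ih (d + n) ((e + n) % 3) ((e + n) / 3)
            (Int.emod_nonneg _ (by norm_num))
            (Int.emod_lt_of_pos _ (by norm_num))
            (Int.ediv_nonneg (by omega) (by norm_num))
            (by omega)]
      split_ifs with h1 h2 h2
      · omega
      · omega
      · omega
      · omega

theorem solve_spec : Claim_equal_solve := by
  intro n _ hpre
  unfold Pre_solve at hpre
  unfold Spec_solve solve solve_alt
  rw [loopA_eq (2 * n.natAbs + 4) 0 0 n le_rfl (by norm_num) hpre (by omega)]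
  have h2 : (0:Int) < 2 := by norm_num
  rw [PySem.Int.floordiv_eq_ediv_of_pos (a := n - 1) h2]
  split_ifs <;> omega
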